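-- pv_equiv track=rewrite | github.com/adhithyan15/coding-adventures | code/packages/python/mini-sqlite/src/mini_sqlite/adapter 2.py | _unquote_string
-- ===== SOURCE A (Python) =====
-- def _unquote_string(s: str) -> str:
--     # The SQL lexer accepts backslash-escapes: 'O\'Brien', 'back\\slash'.
--     # Strip the surrounding quotes and unescape any `\x` → `x` pair.
--     if len(s) >= 2 and s[0] == s[-1] and s[0] in ("'", '"'):
--         body = s[1:-1]
--         out = []
--         i = 0
--         while i < len(body):
--             if body[i] == "\\" and i + 1 < len(body):
--                 out.append(body[i + 1])
--                 i += 2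
--             else:
--                 out.append(body[i])
--                 i += 1
--         return "".join(out)
--     return s
-- ===== SOURCE B (Python) =====
-- import re
--
-- _QUOTED = re.compile(r"\\(.)", re.DOTALL)
--
-- def _unquote_string(s: str) -> str:
--     # Same guard as A; the unescape pass is done by a single regex substitution.
--     if len(s) >= 2 and s[0] == s[-1] and s[0] in ("'", '"'):
--         return _QUOTED.sub(r"\1", s[1:-1])
--     return s
-- ===== Notes on version B (the rewrite author's own statement) =====
-- stated objective: idiomatic
-- what changed: Replaced the explicit index-based while loop with an accumulator list by a single regex substitution (pattern: backslash followed by any character, DOTALL, replaced by that character) on the quote-stripped body.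
import Mathlib
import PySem

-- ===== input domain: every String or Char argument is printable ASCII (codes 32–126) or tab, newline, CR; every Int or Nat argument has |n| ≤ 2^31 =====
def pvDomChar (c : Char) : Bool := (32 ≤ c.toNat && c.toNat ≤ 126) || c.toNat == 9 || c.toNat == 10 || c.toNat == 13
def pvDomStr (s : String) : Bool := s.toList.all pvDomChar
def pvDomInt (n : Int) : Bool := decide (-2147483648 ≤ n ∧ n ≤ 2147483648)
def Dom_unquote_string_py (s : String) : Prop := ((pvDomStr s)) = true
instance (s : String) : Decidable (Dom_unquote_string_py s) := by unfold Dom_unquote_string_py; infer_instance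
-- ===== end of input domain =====

-- B replaces A's index-based while loop by a single regex substitution (idiomatic); same return value.

-- ===== PORT A =====
-- the while loop: index i into body, accumulator out (appended at the back, as Python's out.append)
def pvALoop (body : List Char) (i : Nat) (out : List Char) : List Char :=
  if h : i < body.length then
    if body[i] = '\\' ∧ i + 1 < body.length then
      pvALoop body (i + 2) (out ++ [body.getD (i + 1) ' '])
    else
      pvALoop body (i + 1) (out ++ [body[i]])
  else out
termination_by body.length - i

def unquote_string_py (s : String) : String :=
  let l := s.toList
  if 2 ≤ l.length ∧ l.getD 0 ' ' = l.getD (l.length - 1) ' ' ∧ (l.getD 0 ' ' = '\'' ∨ l.getD 0 ' ' = '"') then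
    let body := (l.drop 1).dropLast        -- s[1:-1]
    String.mk (pvALoop body 0 [])
  else s

-- ===== PORT B =====
-- re.sub(r'\\(.)', r'\1', body, DOTALL): left-to-right, non-overlapping — each backslash
-- followed by any character is replaced by that character; anything else is copied.
def pvRegexUnesc : List Char → List Char
  | '\\' :: c :: rest => c :: pvRegexUnesc rest
  | c :: rest => c :: pvRegexUnesc rest
  | [] => []

def unquote_string_py_alt (s : String) : String :=
  let l := s.toList
  if 2 ≤ l.length ∧ l.getD 0 ' ' = l.getD (l.length - 1) ' ' ∧ (l.getD 0 ' ' = '\'' ∨ l.getD 0 ' ' = '"') then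
    String.mk (pvRegexUnesc ((l.drop 1).dropLast))
  else s

-- ===== PRECONDITION & SPEC =====
def Spec_unquote_string_py (s : String) (out : String) : Prop := out = unquote_string_py_alt s
instance (s : String) (out : String) : Decidable (Spec_unquote_string_py s out) := by unfold Spec_unquote_string_py; infer_instance

-- ===== CLAIM (what is proved, stated in full; the proofs are below) =====
def Claim_equal_unquote_string_py : Prop := ∀ (s : String), Dom_unquote_string_py s → Spec_unquote_string_py s (unquote_string_py s)

-- ===== LEMMAS AND PROOFS =====
theorem pvALoop_eq (body : List Char) (i : Nat) (out : List Char) :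
    pvALoop body i out = out ++ pvRegexUnesc (body.drop i) := by
  induction i, out using pvALoop.induct body with
  | case1 i out h hbs ih =>
      rw [pvALoop, dif_pos h, if_pos hbs, ih]
      obtain ⟨hb, hi1⟩ := hbs
      have hdrop : body.drop i = '\\' :: body.getD (i + 1) ' ' :: body.drop (i + 2) := by
        rw [List.drop_eq_getElem_cons h, hb, List.drop_eq_getElem_cons hi1]
        simp [List.getD, List.getElem?_eq_getElem hi1]
      rw [hdrop]
      simp [pvRegexUnesc]
  | case2 i out h hbs ih =>
      rw [pvALoop, dif_pos h, if_neg hbs, ih]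
      have hdrop : body.drop i = body[i] :: body.drop (i + 1) := List.drop_eq_getElem_cons h
      rw [hdrop]
      -- hbs: ¬(body[i] = '\\' ∧ i+1 < body.length); either char ≠ '\\', or the tail drop is []
      by_cases hc : body[i] = '\\'
      · have : ¬ i + 1 < body.length := fun h1 => hbs ⟨hc, h1⟩
        have : body.drop (i + 1) = [] := List.drop_eq_nil_of_le (by omega)
        rw [this]
        cases hc' : body[i] <;> simp [pvRegexUnesc]
      · have htail : pvRegexUnesc (body[i] :: body.drop (i + 1)) =
            body[i] :: pvRegexUnesc (body.drop (i + 1)) := by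
          cases hd : body.drop (i + 1) with
          | nil => simp [pvRegexUnesc]
          | cons a t =>
            unfold pvRegexUnesc
            split
            · rename_i heq; injection heq with h1 _; exact absurd h1 hc
            · rename_i heq; injection heq with h1 h2; rw [h1, h2, ← pvRegexUnesc.eq_def]
            · simp_all
        rw [htail]
        simp
  | case3 i out h =>
      rw [pvALoop, dif_neg h, List.drop_eq_nil_of_le (by omega)]
      simp [pvRegexUnesc]

-- ===== VERDICT (by name: the statement is the Claim_ definition above) =====
theorem unquote_string_py_spec : Claim_equal_unquote_string_py := by
  intro s _
  unfold Spec_unquote_string_py unquote_string_py unquote_string_py_alt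
  simp only
  split
  · rw [pvALoop_eq]; simp
  · rfl
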